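-- pv_equiv track=rewrite | github.com/exeex/frame-level-music-tagging-dataset | meta_data/read_csv_data.py | get_table_subset
-- ===== SOURCE A (Python) =====
-- def transpose_table(table):
--     return list(map(list, zip(*table)))
--
-- def get_table_subset(table, tags):
--     # table = get_table()
--     # tags = get_hot_tags()
--     tt = transpose_table(table)
--     new_tt = []
--     new_tt.append(tt[0])
--     for row in tt:
--         if row[0] in tags:
--             new_tt.append(row)
--     new_tt.append(tt[-1])
--     return transpose_table(new_tt)
-- ===== SOURCE B (Python) =====
-- def get_table_subset(table, tags):
--     ncols = min(len(r) for r in table)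
--     header = table[0][:ncols]
--     keep = [0] + [i for i in range(ncols) if header[i] in tags] + [ncols - 1]
--     return [[row[i] for i in keep] for row in table]
-- ===== Notes on version B (the rewrite author's own statement) =====
-- stated objective: simpler
-- what changed: B never transposes: it computes the kept column-index list once (always index 0, header-in-tags columns, and the last truncated column) and emits each output row in a single pass over the input rows, instead of A's transpose / filter columns / transpose-back pipeline.
import Mathlib
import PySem

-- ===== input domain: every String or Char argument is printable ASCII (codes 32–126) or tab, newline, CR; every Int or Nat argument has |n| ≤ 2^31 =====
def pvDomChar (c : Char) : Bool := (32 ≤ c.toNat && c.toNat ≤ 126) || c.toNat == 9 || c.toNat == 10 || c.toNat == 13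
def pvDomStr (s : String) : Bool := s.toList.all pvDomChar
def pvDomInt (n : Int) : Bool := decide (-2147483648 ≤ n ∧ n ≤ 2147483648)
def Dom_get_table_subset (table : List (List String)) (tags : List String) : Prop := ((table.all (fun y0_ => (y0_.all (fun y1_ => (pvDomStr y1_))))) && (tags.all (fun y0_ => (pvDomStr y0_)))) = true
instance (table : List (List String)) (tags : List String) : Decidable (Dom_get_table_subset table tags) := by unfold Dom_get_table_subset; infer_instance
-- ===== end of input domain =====

-- B replaces the transpose / filter-columns / transpose-back pipeline by one computed
-- list of kept column indices and a single row-wise pass (objective: simpler).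

-- ===== PORT A =====
-- list(map(list, zip(*t))): zip truncates to the shortest row; zip() of no rows is [].
def pyTranspose (t : List (List String)) : List (List String) :=
  (List.range ((t.map List.length).min?.getD 0)).map (fun i => t.map (fun r => r[i]!))

-- tt[0] / row[0] / tt[-1] are total here only under Pre_ (table and all rows nonempty);
-- Python raises IndexError exactly where Pre_ fails, so head!/getLast! defaults are never claimed.
def get_table_subset (table : List (List String)) (tags : List String) : List (List String) :=
  let tt := pyTranspose table
  let new_tt := tt.head! :: (tt.filter (fun row => tags.contains row.head!) ++ [tt.getLast!])
  pyTranspose new_tt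

-- ===== PORT B =====
def get_table_subset_alt (table : List (List String)) (tags : List String) : List (List String) :=
  let n := (table.map List.length).min?.getD 0
  let header := table.head!.take n
  let keep := 0 :: ((List.range n).filter (fun i => tags.contains header[i]!) ++ [n - 1])
  table.map (fun row => keep.map (fun i => row[i]!))

-- ===== PRECONDITION & SPEC =====
-- Pre_ excludes exactly the inputs where Python A raises IndexError: an empty table, or a
-- table containing an empty row (then zip(*table) has no columns and tt[0] fails).
def Pre_get_table_subset (table : List (List String)) (tags : List String) : Prop :=
  table ≠ [] ∧ ∀ r ∈ table, r ≠ []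
instance (table : List (List String)) (tags : List String) : Decidable (Pre_get_table_subset table tags) := by unfold Pre_get_table_subset; infer_instance

def pvWitness_get_table_subset : List (List String) × List String :=
  ([["id", "rock", "name"], ["1", "0.9", "x"], ["2", "0.1", "y"]], ["rock"])

def Spec_get_table_subset (table : List (List String)) (tags : List String) (out : List (List String)) : Prop := out = get_table_subset_alt table tags
instance (table : List (List String)) (tags : List String) (out : List (List String)) : Decidable (Spec_get_table_subset table tags out) := by unfold Spec_get_table_subset; infer_instance

-- ===== CLAIM (what is proved, stated in full; the proofs are below) =====
def Claim_equal_get_table_subset : Prop := ∀ (table : List (List String)) (tags : List String), Dom_get_table_subset table tags → Pre_get_table_subset table tags → Spec_get_table_subset table tags (get_table_subset table tags)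

-- ===== LEMMAS AND PROOFS =====

theorem min?_map_const {α : Type} (l : List α) (m : Nat) (h : l ≠ []) :
    (l.map (fun _ => m)).min? = some m := by
  rw [List.min?_eq_some_iff]
  constructor
  · cases l with
    | nil => exact absurd rfl h
    | cons a t => simp
  · intro b hb
    simp only [List.mem_map] at hb
    obtain ⟨_, _, rfl⟩ := hb
    exact le_rfl

-- l.map g written as a map over indices
theorem map_eq_range_map {α β : Type} [Inhabited α] (l : List α) (g : α → β) :
    l.map g = (List.range l.length).map (fun j => g l[j]!) := by
  apply List.ext_getElem
  · simp
  · intro j h1 h2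
    simp at h1
    simp [h1]

theorem main_eq (table : List (List String)) (tags : List String)
    (h1 : table ≠ []) (h2 : ∀ r ∈ table, r ≠ []) :
    get_table_subset table tags = get_table_subset_alt table tags := by
  obtain ⟨r0, rest, rfl⟩ : ∃ r0 rest, table = r0 :: rest := by
    cases table with
    | nil => exact absurd rfl h1
    | cons a l => exact ⟨a, l, rfl⟩
  -- the common column count n
  cases hm : ((r0 :: rest).map List.length).min? with
  | none =>
      exact absurd (by simpa using List.min?_eq_none_iff.mp hm) h1
  | some n =>
  obtain ⟨hmem, hle⟩ := List.min?_eq_some_iff.mp hm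
  have hn1 : 1 ≤ n := by
    simp only [List.mem_map] at hmem
    obtain ⟨r, hr, rfl⟩ := hmem
    have := h2 r hr
    cases r with
    | nil => exact absurd rfl this
    | cons a t => simp
  have hler : ∀ r ∈ (r0 :: rest), n ≤ r.length := by
    intro r hr
    exact hle r.length (List.mem_map_of_mem hr)
  obtain ⟨k, rfl⟩ : ∃ k, n = k + 1 := ⟨n - 1, by omega⟩
  simp only [get_table_subset, get_table_subset_alt, hm, Option.getD_some, List.head!_cons]
  -- abbreviations
  set col : Nat → List String := fun i => (r0 :: rest).map (fun r => r[i]!) with hcol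
  have hcoll : ∀ i, (col i).length = rest.length + 1 := by intro i; simp [hcol]
  have hcolhead : ∀ i, (col i).head! = r0[i]! := by intro i; simp [hcol]
  -- head element of col i equals header[i]! for i < n
  have hhead : ∀ i < k + 1, (r0.take (k + 1))[i]! = r0[i]! := by
    intro i hi
    have hr0 : k + 1 ≤ r0.length := hler r0 (by simp)
    have hta : i < (r0.take (k + 1)).length := by simp; omega
    have hb : i < r0.length := by omega
    simp [hb, hi]
  -- the kept index list (B's form)
  set keep : List Nat :=
    0 :: ((List.range (k + 1)).filter (fun i => tags.contains (r0.take (k + 1))[i]!) ++ [k + 1 - 1])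
    with hkeep
  -- the transpose of the table
  have htt : pyTranspose (r0 :: rest) = (List.range (k + 1)).map col := by
    unfold pyTranspose
    rw [hm]
    rfl
  -- A's middle list equals B's middle list, mapped through col
  have hmid :
      ((List.range (k + 1)).map col).filter (fun row => tags.contains row.head!)
        = ((List.range (k + 1)).filter (fun i => tags.contains (r0.take (k + 1))[i]!)).map col := by
    rw [List.filter_map]
    congr 1
    apply List.filter_congr
    intro i hi
    simp only [List.mem_range] at hi
    simp [Function.comp, hcolhead, hhead i hi]
  have hheadtt : ((List.range (k + 1)).map col).head! = col 0 := by
    rw [List.range_succ_eq_map]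
    rfl
  have hlasttt : ((List.range (k + 1)).map col).getLast! = col k := by
    rw [List.range_succ, List.map_append]
    simp [List.getLast!_eq_getLast?_getD]
  -- A's new_tt is keep.map col
  have hnew :
      (col 0 ::
        (((List.range (k + 1)).filter (fun i => tags.contains (r0.take (k + 1))[i]!)).map col
          ++ [col k]))
        = keep.map col := by
    simp [hkeep]
  rw [htt, hheadtt, hlasttt, hmid, hnew]
  -- transpose back
  have hkne : keep ≠ [] := by simp [hkeep]
  have hlen : (keep.map col).map List.length = keep.map (fun _ => rest.length + 1) := by
    rw [List.map_map]
    apply List.map_congr_left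
    intro i _
    simp [Function.comp, hcoll]
  unfold pyTranspose
  rw [hlen, min?_map_const _ _ hkne]
  rw [map_eq_range_map (r0 :: rest) (fun row => keep.map (fun i => row[i]!))]
  simp only [List.length_cons, Option.getD_some]
  apply List.map_congr_left
  intro j hj
  simp only [List.mem_range] at hj
  rw [List.map_map]
  apply List.map_congr_left
  intro i _
  have hjc : j < (col i).length := by rw [hcoll]; omega
  simp only [Function.comp]
  simp [hcol, hj]
  cases j with
  | zero => simp
  | succ jj => simp [List.getElem_map]

-- ===== VERDICT (by name: the statement is the Claim_ definition above) =====
theorem get_table_subset_spec : Claim_equal_get_table_subset := by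
  intro table tags _ hpre
  unfold Spec_get_table_subset
  exact main_eq table tags hpre.1 hpre.2
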